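-- pv_equiv track=rewrite | github.com/Phoenix4582/DazzleCowIdentifier | SelfReID/utilities/entropy.py | convert_from_csv
-- ===== SOURCE A (Python) =====
-- def convert_from_csv(paths:list, cluster_ids:list) -> dict:
--     result = {}
--     assert len(paths) == len(cluster_ids)
--     for path, cluster_id in zip(paths, cluster_ids):
--         if cluster_id not in result.keys():
--             result.update({cluster_id:[path]})
--         else:
--             result[cluster_id].append(path)
--     return result
-- ===== SOURCE B (Python) =====
-- def convert_from_csv(paths: list, cluster_ids: list) -> dict:
--     assert len(paths) == len(cluster_ids)
--     return {k: [p for p, c in zip(paths, cluster_ids) if c == k]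
--             for k in dict.fromkeys(cluster_ids)}
-- ===== Notes on version B (the rewrite author's own statement) =====
-- stated objective: alternative
-- what changed: Replaces A's incremental dict-building loop (membership test, insert-or-append per element) with a two-phase comprehension: deduplicate the cluster ids once in first-occurrence order, then build each group by one filtering pass over the zipped pairs.
import Mathlib
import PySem

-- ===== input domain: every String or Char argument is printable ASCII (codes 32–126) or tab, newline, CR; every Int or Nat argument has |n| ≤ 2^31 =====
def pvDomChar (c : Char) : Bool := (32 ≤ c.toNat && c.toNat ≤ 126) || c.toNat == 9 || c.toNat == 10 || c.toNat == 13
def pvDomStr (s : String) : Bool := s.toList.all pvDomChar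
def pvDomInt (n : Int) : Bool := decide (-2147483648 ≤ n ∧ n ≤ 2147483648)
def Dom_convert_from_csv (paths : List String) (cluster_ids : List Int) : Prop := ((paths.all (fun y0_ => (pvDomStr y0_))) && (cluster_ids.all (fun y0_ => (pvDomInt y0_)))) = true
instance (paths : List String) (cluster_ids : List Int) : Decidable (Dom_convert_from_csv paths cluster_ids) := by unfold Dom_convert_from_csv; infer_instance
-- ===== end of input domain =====

-- B replaces A's incremental insert-or-append dict loop by dedup-the-keys-then-filter-per-key;
-- objective: alternative decomposition (not claimed faster). Equivalence is about the returned dict only.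

-- ===== PORT A =====
-- A's loop: for (path, cluster_id) in zip(paths, cluster_ids): insert [path] if the key is new, else append path.
def convert_from_csv (paths : List String) (cluster_ids : List Int) : List (Int × List String) :=
  ((paths.zip cluster_ids).foldl
    (fun result pc =>
      if result.contains pc.2 = false then result.insert pc.2 [pc.1]
      else result.modify pc.2 [] (fun l => l ++ [pc.1]))
    PySem.Dict.empty).items

-- ===== PORT B =====
-- B: {k: [p for p, c in zip(paths, cluster_ids) if c == k] for k in dict.fromkeys(cluster_ids)}
def convert_from_csv_alt (paths : List String) (cluster_ids : List Int) : List (Int × List String) :=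
  (PySem.List.dedup cluster_ids).map
    (fun k => (k, ((paths.zip cluster_ids).filter (fun pc => pc.2 == k)).map Prod.fst))

-- ===== PRECONDITION & SPEC =====
-- A's assert raises AssertionError when the two lists differ in length: exactly those inputs are excluded.
def Pre_convert_from_csv (paths : List String) (cluster_ids : List Int) : Prop :=
  paths.length = cluster_ids.length
instance (paths : List String) (cluster_ids : List Int) : Decidable (Pre_convert_from_csv paths cluster_ids) := by unfold Pre_convert_from_csv; infer_instance

def pvWitness_convert_from_csv : List String × List Int := (["a", "b", "c"], [1, 2, 1])

def Spec_convert_from_csv (paths : List String) (cluster_ids : List Int) (out : List (Int × List String)) : Prop := out = convert_from_csv_alt paths cluster_ids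
instance (paths : List String) (cluster_ids : List Int) (out : List (Int × List String)) : Decidable (Spec_convert_from_csv paths cluster_ids out) := by unfold Spec_convert_from_csv; infer_instance

-- ===== CLAIM (what is proved, stated in full; the proofs are below) =====
def Claim_equal_convert_from_csv : Prop := ∀ (paths : List String) (cluster_ids : List Int), Dom_convert_from_csv paths cluster_ids → Pre_convert_from_csv paths cluster_ids → Spec_convert_from_csv paths cluster_ids (convert_from_csv paths cluster_ids)

-- ===== LEMMAS AND PROOFS =====

-- A's branch (insert a fresh key / append to an existing one) is, in either case, d[k] = d.get(k, []) ++ [p].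
theorem stepA_eq_modify (d : PySem.Dict Int (List String)) (pc : String × Int) :
    (if d.contains pc.2 = false then d.insert pc.2 [pc.1]
     else d.modify pc.2 [] (fun l => l ++ [pc.1])) = d.modify pc.2 [] (fun l => l ++ [pc.1]) := by
  by_cases h : d.contains pc.2 = false
  · simp [h, PySem.Dict.modify, PySem.Dict.getD_of_not_contains d [] h]
  · simp [h]

-- ===== VERDICT =====
theorem convert_from_csv_spec : Claim_equal_convert_from_csv := by
  intro paths cluster_ids _ hpre
  show convert_from_csv paths cluster_ids = convert_from_csv_alt paths cluster_ids
  unfold convert_from_csv convert_from_csv_alt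
  rw [PySem.List.foldl_congr_mem _ _ _ _ (fun acc x _ => stepA_eq_modify acc x)]
  -- rewrite A's fold as a fold over (cluster_ids.zip paths) keyed on the first component
  have hswap : (cluster_ids.zip paths) = (paths.zip cluster_ids).map Prod.swap := by
    rw [List.zip_swap]
  have hfold :
      (paths.zip cluster_ids).foldl
        (fun (d : PySem.Dict Int (List String)) pc => d.modify pc.2 [] (fun l => l ++ [pc.1]))
        PySem.Dict.empty
      = (cluster_ids.zip paths).foldl
        (fun (d : PySem.Dict Int (List String)) p => d.modify p.1 [] (fun l => l ++ [p.2]))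
        PySem.Dict.empty := by
    rw [hswap, List.foldl_map]
    rfl
  rw [hfold]
  set D := (cluster_ids.zip paths).foldl
      (fun (d : PySem.Dict Int (List String)) p => d.modify p.1 [] (fun l => l ++ [p.2]))
      PySem.Dict.empty with hD
  have hkeys : D.keys = PySem.List.dedup cluster_ids := by
    rw [hD]
    have := PySem.Dict.keys_foldl_modify_key (cluster_ids.zip paths) Prod.fst []
      (fun _ p l => l ++ [p.2]) (PySem.Dict.empty (κ := Int) (ν := List String))
    simp only at this
    rw [this]
    have hfst : (cluster_ids.zip paths).map Prod.fst = cluster_ids :=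
      List.map_fst_zip (le_of_eq hpre.symm)
    simp [hfst, PySem.Set.update, PySem.Set.ofList_eq_foldl, PySem.Dict.keys_empty]
  have hnodup : D.keys.Nodup := by
    rw [hkeys]; exact PySem.List.nodup_dedup cluster_ids
  rw [PySem.Dict.items_eq_map_keys D hnodup [], hkeys]
  refine List.map_congr_left (fun k _ => ?_)
  have hget : D.getD k [] =
      ((cluster_ids.zip paths).filter (fun p => p.1 == k)).map (fun p => p.2) := by
    rw [hD]
    have := PySem.Dict.getD_foldl_modify_append (cluster_ids.zip paths)
      (PySem.Dict.empty (κ := Int) (ν := List String)) k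
    simpa using this
  rw [hget, hswap, List.filter_map]
  simp [Function.comp_def, Prod.swap]
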